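-- pv_equiv track=rewrite | github.com/McCoyGroup/Psience | Psience/Data/KEData.py | _get_remapping
-- ===== SOURCE A (Python) =====
-- def _get_remapping(i1, i2):
--     remapping = {}
--     n = 1
--     _ = []
--     for i in i1:
--         if i not in remapping:
--             remapping[i] = n
--             _.append(n)
--             n += 1
--         else:
--             _.append(remapping[i])
--     i1 = tuple(_)
--
--     _ = []
--     for i in i2:
--         if i not in remapping:
--             remapping[i] = n
--             _.append(n)
--             n += 1
--         else:
--             _.append(remapping[i])
--     i2 = tuple(_)
--
--     return i1, i2
-- ===== SOURCE B (Python) =====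
-- def _get_remapping(i1, i2):
--     # Closed-form labeling: the canonical label of x is the number of distinct
--     # values in the concatenated sequence up to and including x's first
--     # occurrence.  No remapping dict or counter is built at all.
--     combined = list(i1) + list(i2)
--     def label(x):
--         return len(set(combined[:combined.index(x) + 1]))
--     return tuple(label(x) for x in i1), tuple(label(x) for x in i2)
-- ===== Notes on version B (the rewrite author's own statement) =====
-- stated objective: alternative
-- what changed: B builds no remapping dict at all: it computes each label by a closed-form counting rule - the label of x is the number of distinct values in the concatenation i1+i2 up to and including x's first occurrence (len(set(combined[:combined.index(x)+1]))) - instead of A's stateful loops that assign labels from an incrementing counter stored in a dict.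
import Mathlib
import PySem

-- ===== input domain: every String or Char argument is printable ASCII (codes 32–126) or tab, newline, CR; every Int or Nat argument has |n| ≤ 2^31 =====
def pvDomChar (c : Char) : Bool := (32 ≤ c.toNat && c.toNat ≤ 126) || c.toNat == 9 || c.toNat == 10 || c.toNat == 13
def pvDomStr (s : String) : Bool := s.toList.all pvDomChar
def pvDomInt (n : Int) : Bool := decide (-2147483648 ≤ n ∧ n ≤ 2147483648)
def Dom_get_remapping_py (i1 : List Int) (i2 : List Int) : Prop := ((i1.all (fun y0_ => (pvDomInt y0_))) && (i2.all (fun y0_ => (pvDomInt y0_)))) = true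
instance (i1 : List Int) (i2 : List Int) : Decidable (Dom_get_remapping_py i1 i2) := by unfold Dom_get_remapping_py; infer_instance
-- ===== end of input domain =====

-- B replaces A's stateful dict-and-counter labeling by a closed-form counting rule:
-- label(x) = number of distinct values in i1+i2 up to and including x's first
-- occurrence (alternative algorithm, slower on large inputs; no speed is claimed).


-- ===== PORT A =====
-- one iteration of A's interleaved loop body: state = (remapping, n, accumulator "_")
def aStep (st : PySem.Dict Int Int × Int × List Int) (i : Int) : PySem.Dict Int Int × Int × List Int :=
  match st with
  | (d, n, acc) =>
    match d.get? i with
    | none => (d.insert i n, n + 1, acc ++ [n])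
    | some v => (d, n, acc ++ [v])

def get_remapping_py (i1 : List Int) (i2 : List Int) : List Int × List Int :=
  let s1 := i1.foldl aStep (PySem.Dict.empty, 1, [])
  let s2 := i2.foldl aStep (s1.1, s1.2.1, [])
  (s1.2.2, s2.2.2)

-- ===== PORT B =====
-- label(x) = len(set(combined[:combined.index(x) + 1])); the none branch is
-- unreachable since label is only applied to elements of combined
def bLabel (combined : List Int) (x : Int) : Int :=
  match PySem.List.index? combined x with
  | some j => PySem.Set.len (PySem.Set.ofList (PySem.List.slice combined none (some ((j : Int) + 1))))
  | none => 0

def get_remapping_py_alt (i1 : List Int) (i2 : List Int) : List Int × List Int :=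
  let combined := i1 ++ i2
  (i1.map (bLabel combined), i2.map (bLabel combined))

-- ===== PRECONDITION & SPEC =====
def Spec_get_remapping_py (i1 : List Int) (i2 : List Int) (out : List Int × List Int) : Prop := out = get_remapping_py_alt i1 i2
instance (i1 : List Int) (i2 : List Int) (out : List Int × List Int) : Decidable (Spec_get_remapping_py i1 i2 out) := by unfold Spec_get_remapping_py; infer_instance

-- ===== CLAIM (what is proved, stated in full; the proofs are below) =====
def Claim_equal_get_remapping_py : Prop := ∀ (i1 : List Int) (i2 : List Int), Dom_get_remapping_py i1 i2 → Spec_get_remapping_py i1 i2 (get_remapping_py i1 i2)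

-- ===== LEMMAS AND PROOFS =====

-- proof-side bridge: the dict A ends up with, built alone (no counter, no accumulator)
def bInsert (d : PySem.Dict Int Int) (i : Int) : PySem.Dict Int Int :=
  if d.contains i then d else d.insert i ((d.size : Int) + 1)

-- the build fold never changes the value already assigned to a key
theorem bFold_mono (l : List Int) (d : PySem.Dict Int Int) (k : Int) (v : Int)
    (h : d.get? k = some v) : (l.foldl bInsert d).get? k = some v := by
  induction l generalizing d with
  | nil => simpa using h
  | cons i l ih =>
    simp only [List.foldl_cons]
    apply ih
    unfold bInsert
    split
    · exact h
    · rename_i hc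
      rcases eq_or_ne k i with rfl | hne
      · rw [PySem.Dict.contains_eq_isSome_get?, h] at hc; simp at hc
      · rw [PySem.Dict.get?_insert_of_ne _ _ hne]; exact h

-- every element of the list has a label after the build fold
theorem bFold_present (l : List Int) (d : PySem.Dict Int Int) (k : Int)
    (h : k ∈ l) : ∃ v, (l.foldl bInsert d).get? k = some v := by
  induction l generalizing d with
  | nil => simp at h
  | cons i l ih =>
    simp only [List.foldl_cons]
    rcases List.mem_cons.mp h with rfl | hm
    · have : ∃ v, (bInsert d k).get? k = some v := by
        unfold bInsert
        split
        · rename_i hc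
          rw [PySem.Dict.contains_eq_isSome_get?] at hc
          exact Option.isSome_iff_exists.mp hc
        · exact ⟨_, PySem.Dict.get?_insert_self _ _ _⟩
      obtain ⟨v, hv⟩ := this
      exact ⟨v, bFold_mono _ _ _ _ hv⟩
    · exact ih _ hm

-- keys after the build fold: the old keys updated by the list
theorem bFold_keys (l : List Int) (d : PySem.Dict Int Int) :
    (l.foldl bInsert d).keys = PySem.Set.update d.keys l := by
  induction l generalizing d with
  | nil => simp [PySem.Set.update]
  | cons i l ih =>
    simp only [List.foldl_cons, PySem.Set.update_cons]
    rw [ih]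
    congr 1
    unfold bInsert
    split
    · rename_i hc
      rw [PySem.Set.add_of_mem]
      exact (PySem.Dict.contains_iff_mem_keys _ _).mp hc
    · rename_i hc
      rw [PySem.Dict.keys_insert_of_not_contains _ _ (by simpa using hc),
          PySem.Set.add_of_not_mem]
      intro hm
      exact hc ((PySem.Dict.contains_iff_mem_keys _ _).mpr hm)

-- size of a dict is the length of its key list
theorem dict_size_eq_keys_length (d : PySem.Dict Int Int) : d.size = d.keys.length := by
  simp [PySem.Dict.size, PySem.Dict.keys]

-- A's interleaved loop, started with n = size+1, equals the build fold plus a map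
-- through the resulting dict
theorem aloop_eq (l : List Int) (d : PySem.Dict Int Int) (n : Int) (acc : List Int)
    (hn : n = (d.size : Int) + 1) :
    l.foldl aStep (d, n, acc) =
      (l.foldl bInsert d, ((l.foldl bInsert d).size : Int) + 1,
       acc ++ l.map (fun i => (l.foldl bInsert d).getD i 0)) := by
  induction l generalizing d n acc with
  | nil => simp [hn]
  | cons i l ih =>
    simp only [List.foldl_cons, List.map_cons]
    rcases hget : d.get? i with _ | v
    · have hc : d.contains i = false := by
        rw [PySem.Dict.contains_eq_isSome_get?, hget]; rfl
      have hb : bInsert d i = d.insert i n := by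
        unfold bInsert; rw [hc, hn]; simp
      have hsz : ((d.insert i n).size : Int) = (d.size : Int) + 1 := by
        rw [PySem.Dict.size_insert, hc]; simp
      have hstep : aStep (d, n, acc) i = (d.insert i n, n + 1, acc ++ [n]) := by
        simp [aStep, hget]
      rw [hstep, ih (d.insert i n) (n + 1) (acc ++ [n]) (by rw [hsz, hn]), hb]
      have hiv : (l.foldl bInsert (d.insert i n)).get? i = some n :=
        bFold_mono _ _ _ _ (PySem.Dict.get?_insert_self _ _ _)
      rw [PySem.Dict.getD_of_get?_eq_some _ _ hiv]
      simp
    · have hstep : aStep (d, n, acc) i = (d, n, acc ++ [v]) := by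
        simp [aStep, hget]
      have hb : bInsert d i = d := by
        unfold bInsert
        rw [PySem.Dict.contains_eq_isSome_get?, hget]
        simp
      rw [hstep, ih d n (acc ++ [v]) hn, hb]
      have hiv : (l.foldl bInsert d).get? i = some v := bFold_mono _ _ _ _ hget
      rw [PySem.Dict.getD_of_get?_eq_some _ _ hiv]
      simp

-- the value the build fold assigns to x is exactly B's closed-form label
theorem bFold_value (l : List Int) (x : Int) (hx : x ∈ l) :
    (l.foldl bInsert PySem.Dict.empty).get? x = some (bLabel l x) := by
  obtain ⟨j, hj⟩ := Option.isSome_iff_exists.mp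
    ((PySem.List.index?_isSome_iff l x).mpr hx)
  obtain ⟨pre, suf, hsplit, hlen, hnotmem⟩ := (PySem.List.index?_eq_some_iff l x j).mp hj
  have hxs : x ∉ PySem.Set.ofList pre := by
    rw [PySem.Set.mem_ofList]; exact hnotmem
  -- compute B's label
  have hslice : PySem.List.slice l none (some ((j : Int) + 1)) = pre ++ [x] := by
    have : ((j : Int) + 1) = ((j + 1 : Nat) : Int) := by push_cast; ring
    rw [this, PySem.List.slice_to_natCast, hsplit, ← hlen]
    simp [List.take_append]
  have hlabel : bLabel l x = ((PySem.Set.ofList pre).length : Int) + 1 := by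
    unfold bLabel
    rw [hj]
    simp only [hslice, PySem.Set.ofList_append_singleton]
    rw [PySem.Set.add_of_not_mem hxs]
    simp [PySem.Set.len]
  -- compute the dict's value
  rw [hlabel, hsplit, List.foldl_append, List.foldl_cons]
  set P := pre.foldl bInsert PySem.Dict.empty with hP
  have hkeys : P.keys = PySem.Set.ofList pre := by
    rw [hP, bFold_keys]
    simp [PySem.Set.update_nil_left]
  have hc : P.contains x = false := by
    by_contra h
    have := (PySem.Dict.contains_iff_mem_keys _ _).mp (by simpa using h)
    rw [hkeys, PySem.Set.mem_ofList] at this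
    exact hnotmem this
  have hsz : ((P.size : Int)) = ((PySem.Set.ofList pre).length : Int) := by
    rw [dict_size_eq_keys_length, hkeys]
  have hstep : bInsert P x = P.insert x (((PySem.Set.ofList pre).length : Int) + 1) := by
    unfold bInsert
    rw [hc, hsz]
    simp
  rw [hstep]
  exact bFold_mono _ _ _ _ (PySem.Dict.get?_insert_self _ _ _)

-- ===== VERDICT (by name: the statement is the Claim_ definition above) =====
theorem get_remapping_py_spec : Claim_equal_get_remapping_py := by
  intro i1 i2 _
  unfold Spec_get_remapping_py get_remapping_py get_remapping_py_alt
  have h1 := aloop_eq i1 PySem.Dict.empty 1 [] (by simp)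
  set D1 := i1.foldl bInsert PySem.Dict.empty with hD1
  have h2 := aloop_eq i2 D1 ((D1.size : Int) + 1) [] rfl
  set D2 := i2.foldl bInsert D1 with hD2
  have hD2' : (i1 ++ i2).foldl bInsert PySem.Dict.empty = D2 := by
    rw [List.foldl_append]
  simp only [h1, h2, List.nil_append, Prod.mk.injEq]
  refine ⟨?_, ?_⟩
  · -- i1's labels: D1's value survives into D2, where bFold_value characterizes it
    apply List.map_congr_left
    intro a ha
    obtain ⟨v, hv⟩ := bFold_present i1 PySem.Dict.empty a ha
    have hv2 : D2.get? a = some v := bFold_mono i2 D1 a v hv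
    have hlbl : D2.get? a = some (bLabel (i1 ++ i2) a) := by
      rw [← hD2']
      exact bFold_value _ _ (List.mem_append.mpr (Or.inl ha))
    have hveq : v = bLabel (i1 ++ i2) a := by
      rw [hv2] at hlbl
      exact Option.some.inj hlbl
    rw [PySem.Dict.getD_of_get?_eq_some _ _ hv, hveq]
  · -- i2's labels are read off D2 directly
    apply List.map_congr_left
    intro a ha
    have hlbl : D2.get? a = some (bLabel (i1 ++ i2) a) := by
      rw [← hD2']
      exact bFold_value _ _ (List.mem_append.mpr (Or.inr ha))
    rw [PySem.Dict.getD_of_get?_eq_some _ _ hlbl]
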